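-- pv_equiv track=rewrite | github.com/marin-m/pbtk | utils/descpb_to_proto.py | min_name
-- ===== SOURCE A (Python) =====
-- def min_name(name, scopes):
--     name, cur_scope = name.split('.'), scopes[0].split('.')
--     short_name = [name.pop()]
--
--     while name and (cur_scope[:len(name)] != name or \
--                     any(list_rfind(scope.split('.'), short_name[0]) > len(name) \
--                         for scope in scopes)):
--         short_name.insert(0, name.pop())
--
--     return '.'.join(short_name)
--
-- list_rfind = lambda x, i: len(x) - 1 - x[::-1].index(i) if i in x else -1
-- ===== SOURCE B (Python) =====
-- def min_name(name, scopes):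
--     cur_scope = scopes[0].split('.')
--     # Precompute, once, the maximum last-occurrence index of every token
--     # across all scope splits; the loop then tests it in O(1).
--     maxpos = {}
--     for scope in scopes:
--         for i, tok in enumerate(scope.split('.')):
--             if maxpos.get(tok, -1) < i:
--                 maxpos[tok] = i
--     parts = name.split('.')
--     short_name = [parts.pop()]
--     while parts and (cur_scope[:len(parts)] != parts or
--                      maxpos.get(short_name[0], -1) > len(parts)):
--         short_name.insert(0, parts.pop())
--     return '.'.join(short_name)
-- ===== Notes on version B (the rewrite author's own statement) =====
-- stated objective: alternative
-- what changed: B precomputes, in one pass over the scopes, a dict mapping each token to its maximum last-occurrence index across all scope splits, so the while loop's inner any(list_rfind(scope.split('.'), ...)) scan over every scope becomes a single dict lookup per iteration; it trades that per-iteration rescan for an unconditional upfront pass over all scopes.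
import Mathlib
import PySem

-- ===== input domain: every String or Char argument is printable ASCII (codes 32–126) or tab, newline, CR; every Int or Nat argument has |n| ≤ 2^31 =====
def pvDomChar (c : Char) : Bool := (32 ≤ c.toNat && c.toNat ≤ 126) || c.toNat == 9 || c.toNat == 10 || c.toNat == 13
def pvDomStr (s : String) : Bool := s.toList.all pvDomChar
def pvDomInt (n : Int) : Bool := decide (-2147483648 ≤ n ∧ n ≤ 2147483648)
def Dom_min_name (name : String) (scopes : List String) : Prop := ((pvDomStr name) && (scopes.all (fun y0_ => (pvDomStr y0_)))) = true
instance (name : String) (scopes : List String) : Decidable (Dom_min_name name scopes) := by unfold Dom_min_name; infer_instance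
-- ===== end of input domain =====

-- B replaces A's per-iteration scan of every scope (list_rfind inside any) by a table,
-- built once, of each token's maximum last-occurrence index over all scope splits.

-- s.split('.') — PySem.Str.split? is none only for an empty separator, so getD [] is never taken
def splitDot (s : String) : List String := (PySem.Str.split? s ".").getD []

-- ===== PORT A =====
-- list_rfind = lambda x, i: len(x) - 1 - x[::-1].index(i) if i in x else -1
-- (x[::-1] is x.reverse — PySem.List.slice?_none_none_neg_one; .index is PySem.List.index?,
--  total via getD 0 because it is only evaluated when i ∈ x)
def list_rfind (x : List String) (i : String) : Int :=
  if i ∈ x then (x.length : Int) - 1 - ((PySem.List.index? x.reverse i).getD 0 : Nat) else -1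

-- the while loop: pops name's last element and prepends it to short_name
-- (cur_scope[:len(name)] is PySem.List.slice with a nonnegative bound = List.take, by slice_to_natCast)
def minNameLoopA (scopes curScope : List String) (nm shortName : List String) : List String :=
  if h : nm = [] then shortName
  else if (curScope.take nm.length != nm)
          || scopes.any (fun scope =>
               decide (list_rfind (splitDot scope) (shortName.headD "") > (nm.length : Int))) then
    minNameLoopA scopes curScope nm.dropLast (nm.getLast h :: shortName)
  else shortName
termination_by nm.length
decreasing_by
  have : 0 < nm.length := List.length_pos_iff.mpr h
  simp [List.length_dropLast]; omega

def min_name (name : String) (scopes : List String) : String :=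
  let nm := splitDot name
  let curScope := splitDot (scopes.headD "")   -- scopes[0]; Pre_ excludes scopes = []
  PySem.Str.join "." (minNameLoopA scopes curScope nm.dropLast [nm.getLastD ""])

-- ===== PORT B =====
-- maxpos update: if maxpos.get(tok, -1) < i: maxpos[tok] = i
def maxposUpd (d : PySem.Dict String Int) (p : Int × String) : PySem.Dict String Int :=
  if d.getD p.2 (-1) < p.1 then d.insert p.2 p.1 else d

-- for scope in scopes: for i, tok in enumerate(scope.split('.')): …
def buildMaxpos (scopes : List String) : PySem.Dict String Int :=
  scopes.foldl
    (fun d scope => (PySem.List.enumerate (splitDot scope)).foldl maxposUpd d)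
    PySem.Dict.empty

def minNameLoopB (curScope : List String) (maxpos : PySem.Dict String Int)
    (nm shortName : List String) : List String :=
  if h : nm = [] then shortName
  else if (curScope.take nm.length != nm)
          || decide (maxpos.getD (shortName.headD "") (-1) > (nm.length : Int)) then
    minNameLoopB curScope maxpos nm.dropLast (nm.getLast h :: shortName)
  else shortName
termination_by nm.length
decreasing_by
  have : 0 < nm.length := List.length_pos_iff.mpr h
  simp [List.length_dropLast]; omega

def min_name_alt (name : String) (scopes : List String) : String :=
  let curScope := splitDot (scopes.headD "")   -- scopes[0]; Pre_ excludes scopes = []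
  let maxpos := buildMaxpos scopes
  let nm := splitDot name
  PySem.Str.join "." (minNameLoopB curScope maxpos nm.dropLast [nm.getLastD ""])

-- ===== PRECONDITION & SPEC =====
-- Pre_ excludes empty scopes, on which scopes[0] raises IndexError in both A and B.
def Pre_min_name (name : String) (scopes : List String) : Prop := scopes ≠ []
instance (name : String) (scopes : List String) : Decidable (Pre_min_name name scopes) := by
  unfold Pre_min_name; infer_instance
def pvWitness_min_name : String × List String := ("pkg.sub.Msg", ["pkg.sub", "pkg.other.Msg"])

def Spec_min_name (name : String) (scopes : List String) (out : String) : Prop := out = min_name_alt name scopes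
instance (name : String) (scopes : List String) (out : String) : Decidable (Spec_min_name name scopes out) := by unfold Spec_min_name; infer_instance

-- ===== CLAIM (what is proved, stated in full; the proofs are below) =====
def Claim_equal_min_name : Prop := ∀ (name : String) (scopes : List String), Dom_min_name name scopes → Pre_min_name name scopes → Spec_min_name name scopes (min_name name scopes)

-- ===== LEMMAS AND PROOFS =====

-- running maximum of the indices paired with tok, from start a
def gmax (ps : List (Int × String)) (tok : String) (a : Int) : Int :=
  ps.foldl (fun acc p => if p.2 = tok then max acc p.1 else acc) a

-- running maximum over scopes of tok's last-occurrence index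
def rfMax (scopes : List String) (tok : String) (a : Int) : Int :=
  scopes.foldl (fun acc s => max acc (list_rfind (splitDot s) tok)) a

lemma gmax_max (ps : List (Int × String)) (tok : String) (a b : Int) :
    gmax ps tok (max a b) = max a (gmax ps tok b) := by
  induction ps generalizing b with
  | nil => rfl
  | cons p ps ih =>
    simp only [gmax, List.foldl_cons] at *
    by_cases hp : p.2 = tok
    · simp [hp, max_assoc, ih]
    · simp [hp, ih]

lemma gmax_lt (ps : List (Int × String)) (tok : String) (a B : Int)
    (hps : ∀ p ∈ ps, p.1 < B) (ha : a < B) : gmax ps tok a < B := by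
  induction ps generalizing a with
  | nil => exact ha
  | cons p ps ih =>
    simp only [gmax, List.foldl_cons]
    refine ih _ (fun q hq => hps q (List.mem_cons_of_mem _ hq)) ?_
    by_cases hp : p.2 = tok
    · rw [if_pos hp]
      exact max_lt_iff.mpr ⟨ha, hps p List.mem_cons_self⟩
    · rw [if_neg hp]
      exact ha

-- one conditional update, read at key tok
lemma maxposUpd_getD (d : PySem.Dict String Int) (p : Int × String) (tok : String) :
    (maxposUpd d p).getD tok (-1)
      = if p.2 = tok then max (d.getD tok (-1)) p.1 else d.getD tok (-1) := by
  unfold maxposUpd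
  by_cases hp : p.2 = tok
  · rw [if_pos hp]
    subst hp
    split_ifs with h
    · rw [PySem.Dict.getD_insert_self]
      exact (max_eq_right (le_of_lt h)).symm
    · exact (max_eq_left (le_of_not_gt h)).symm
  · rw [if_neg hp]
    split_ifs with h
    · exact PySem.Dict.getD_insert_of_ne d p.1 (-1) (Ne.symm hp)
    · rfl

-- the inner enumerate-fold keyed reading: getD after = gmax of the pairs from getD before
lemma inner_getD (ps : List (Int × String)) (d : PySem.Dict String Int) (tok : String) :
    (ps.foldl maxposUpd d).getD tok (-1) = gmax ps tok (d.getD tok (-1)) := by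
  induction ps generalizing d with
  | nil => rfl
  | cons p ps ih =>
    simp only [List.foldl_cons, gmax, ih, maxposUpd_getD]

-- appending one element to the scanned list moves tok's last occurrence
lemma rfind_append (xs : List String) (x tok : String) :
    list_rfind (xs ++ [x]) tok
      = if x = tok then (xs.length : Int) else list_rfind xs tok := by
  have hrev : (xs ++ [x]).reverse = x :: xs.reverse := by simp
  by_cases hx : x = tok
  · subst hx
    rw [if_pos rfl]
    unfold list_rfind
    rw [if_pos (by simp), hrev, PySem.List.index?_cons_self]
    simp
  · rw [if_neg hx]
    unfold list_rfind
    by_cases hm : tok ∈ xs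
    · rw [if_pos (show tok ∈ xs ++ [x] by simp [hm]), if_pos hm, hrev,
        PySem.List.index?_cons_of_ne _ hx]
      obtain ⟨j, hj⟩ : ∃ j, PySem.List.index? xs.reverse tok = some j := by
        rw [← Option.isSome_iff_exists, PySem.List.index?_isSome_iff]
        simpa using hm
      rw [hj]
      simp
      ring
    · rw [if_neg (show tok ∉ xs ++ [x] by simp [hm]; exact fun h => hx h.symm), if_neg hm]

-- gmax over enumerate parts from -1 IS list_rfind
lemma gmax_enumerate_eq_rfind (parts : List String) (tok : String) :
    gmax (PySem.List.enumerate parts) tok (-1) = list_rfind parts tok := by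
  induction parts using List.reverseRecOn with
  | nil => simp [gmax, PySem.List.enumerate, list_rfind]
  | append_singleton xs x ih =>
    rw [PySem.List.enumerate_append]
    have hsing : PySem.List.enumerate [x] ((0 : Int) + xs.length) = [((xs.length : Int), x)] := by
      simp [PySem.List.enumerate_cons, PySem.List.enumerate_nil]
    rw [hsing, rfind_append]
    have hbound : gmax (PySem.List.enumerate xs) tok (-1) < (xs.length : Int) := by
      refine gmax_lt _ _ _ _ ?_ (by omega)
      intro p hp
      rw [PySem.List.mem_enumerate_iff] at hp
      obtain ⟨k, hk, rfl⟩ := hp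
      simp
      omega
    unfold gmax
    rw [List.foldl_append]
    simp only [List.foldl_cons, List.foldl_nil]
    show (if x = tok then max (gmax (PySem.List.enumerate xs) tok (-1)) ((xs.length : Int))
          else gmax (PySem.List.enumerate xs) tok (-1)) = _
    by_cases hx : x = tok
    · rw [if_pos hx, if_pos hx, max_eq_right (le_of_lt hbound)]
    · rw [if_neg hx, if_neg hx, ih]

-- the whole dict build: getD = running max of list_rfind over scopes
lemma buildMaxpos_getD (scopes : List String) (d : PySem.Dict String Int) (tok : String)
    (hd : ∀ k, -1 ≤ d.getD k (-1)) :
    (scopes.foldl (fun d scope =>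
        (PySem.List.enumerate (splitDot scope)).foldl maxposUpd d) d).getD tok (-1)
      = rfMax scopes tok (d.getD tok (-1)) := by
  induction scopes generalizing d with
  | nil => rfl
  | cons s ss ih =>
    simp only [List.foldl_cons, rfMax] at *
    have hstep : ∀ k, ((PySem.List.enumerate (splitDot s)).foldl maxposUpd d).getD k (-1)
        = max (d.getD k (-1)) (list_rfind (splitDot s) k) := by
      intro k
      rw [inner_getD]
      have h := gmax_max (PySem.List.enumerate (splitDot s)) k (d.getD k (-1)) (-1)
      rw [max_eq_left (hd k)] at h
      rw [h, gmax_enumerate_eq_rfind]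
    rw [ih _ (fun k => le_trans (hd k) (by rw [hstep k]; exact le_max_left _ _)), hstep tok]

lemma getD_empty (tok : String) : (PySem.Dict.empty : PySem.Dict String Int).getD tok (-1) = -1 := rfl

-- max-fold vs any: rfMax > L iff the start or some scope's rfind exceeds L
lemma rfMax_gt_iff (scopes : List String) (tok : String) (a L : Int) :
    rfMax scopes tok a > L ↔ a > L ∨
      (scopes.any (fun s => decide (list_rfind (splitDot s) tok > L))) = true := by
  induction scopes generalizing a with
  | nil => simp [rfMax]
  | cons s ss ih =>
    simp only [rfMax, List.foldl_cons] at *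
    rw [ih]
    simp only [List.any_cons, Bool.or_eq_true, decide_eq_true_eq, gt_iff_lt, lt_max_iff]
    tauto

-- the two loops agree when B's table is the one built from the same scopes
lemma loop_eq (scopes curScope : List String) (nm shortName : List String) :
    minNameLoopA scopes curScope nm shortName
      = minNameLoopB curScope (buildMaxpos scopes) nm shortName := by
  fun_induction minNameLoopA scopes curScope nm shortName with
  | case1 shortName => rw [minNameLoopB, dif_pos rfl]
  | case2 nm shortName h hc ih =>
    rw [minNameLoopB, dif_neg h, if_pos ?_, ih]
    have hg := buildMaxpos_getD scopes PySem.Dict.empty (shortName.headD "")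
      (fun k => le_of_eq (getD_empty k).symm)
    rw [getD_empty] at hg
    rcases Bool.or_eq_true_iff.mp hc with h1 | h1
    · exact Bool.or_eq_true_iff.mpr (Or.inl h1)
    · refine Bool.or_eq_true_iff.mpr (Or.inr ?_)
      simp only [decide_eq_true_eq]
      show (buildMaxpos scopes).getD (shortName.headD "") (-1) > (nm.length : Int)
      rw [show (buildMaxpos scopes) = scopes.foldl (fun d scope =>
        (PySem.List.enumerate (splitDot scope)).foldl maxposUpd d) PySem.Dict.empty from rfl, hg]
      exact (rfMax_gt_iff scopes (shortName.headD "") (-1) (nm.length : Int)).mpr (Or.inr h1)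
  | case3 nm shortName h hc =>
    rw [minNameLoopB, dif_neg h, if_neg ?_]
    have hg := buildMaxpos_getD scopes PySem.Dict.empty (shortName.headD "")
      (fun k => le_of_eq (getD_empty k).symm)
    rw [getD_empty] at hg
    intro hcb
    apply hc
    rcases Bool.or_eq_true_iff.mp hcb with h1 | h1
    · exact Bool.or_eq_true_iff.mpr (Or.inl h1)
    · refine Bool.or_eq_true_iff.mpr (Or.inr ?_)
      simp only [decide_eq_true_eq] at h1 ⊢
      rw [show (buildMaxpos scopes) = scopes.foldl (fun d scope =>
        (PySem.List.enumerate (splitDot scope)).foldl maxposUpd d) PySem.Dict.empty from rfl, hg] at h1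
      rcases (rfMax_gt_iff scopes (shortName.headD "") (-1) (nm.length : Int)).mp h1 with h2 | h2
      · omega
      · exact h2

-- ===== VERDICT (by name: the statement is the Claim_ definition above) =====
theorem min_name_spec : Claim_equal_min_name := by
  intro name scopes _ _
  show min_name name scopes = min_name_alt name scopes
  simp only [min_name, min_name_alt, loop_eq]
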